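-- pv_equiv track=rewrite | github.com/GSidiropoulos/kgsqa_for_unseen_domains | utils/model_utils.py | predicate_intersection_wrt_words
-- ===== SOURCE A (Python) =====
-- def predicate_intersection_wrt_words(predicate_words, in_domain=True):
--     """
--     Predicates in which the text of their label intersect
--     :param predicate_words: list of lists where each list consists of predicate tokens
--     :param in_domain: if true then intersection to be the domain,
--      else at least one token matched between predicates
--     :return: Dictionary with predicate_id -> predicate_ids (intersection)
--     """
--
--     predicates_intersect = dict()
--     for k, label_words in enumerate(predicate_words):
--         label_words = label_words if in_domain else set(label_words)
--
--         label_with_at_least_one_common_words = []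
--         for k_, label_words_ in enumerate(predicate_words):
--             if k != k_:
--                 label_words_ = label_words_ if in_domain else set(label_words_)
--
--                 if in_domain:
--                     if label_words[0] == label_words_[0]:
--                         label_with_at_least_one_common_words.append(k_)
--                 else:
--                     if len(label_words.intersection(label_words_)) != 0:
--                         label_with_at_least_one_common_words.append(k_)
--
--         predicates_intersect[k] = label_with_at_least_one_common_words
--
--     return predicates_intersect
-- ===== SOURCE B (Python) =====
-- def predicate_intersection_wrt_words(predicate_words, in_domain=True):
--     """Inverted-index re-implementation: group by first token (in_domain) or
--     build a token -> indices index (else), instead of comparing all pairs."""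
--     result = {}
--     if in_domain:
--         groups = {}
--         for i, words in enumerate(predicate_words):
--             groups.setdefault(words[0], []).append(i)
--         for k, words in enumerate(predicate_words):
--             result[k] = [j for j in groups[words[0]] if j != k]
--     else:
--         n = len(predicate_words)
--         index = {}
--         for i, words in enumerate(predicate_words):
--             for t in set(words):
--                 index.setdefault(t, []).append(i)
--         for k, words in enumerate(predicate_words):
--             seen = set()
--             for t in set(words):
--                 seen.update(index.get(t, ()))
--             result[k] = [j for j in range(n) if j != k and j in seen]
--     return result
-- ===== Notes on version B (the rewrite author's own statement) =====
-- stated objective: faster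
-- what changed: Replaces A's all-pairs nested scan by an inverted index: group indices by first token (in_domain) or build a token->indices index plus a per-predicate seen-set (else), so no pair of predicates is ever compared token-by-token.
-- outside the precondition, e.g. on predicate_intersection_wrt_words([[]], True): A returns {0: []}, B raises IndexError
import Mathlib
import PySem

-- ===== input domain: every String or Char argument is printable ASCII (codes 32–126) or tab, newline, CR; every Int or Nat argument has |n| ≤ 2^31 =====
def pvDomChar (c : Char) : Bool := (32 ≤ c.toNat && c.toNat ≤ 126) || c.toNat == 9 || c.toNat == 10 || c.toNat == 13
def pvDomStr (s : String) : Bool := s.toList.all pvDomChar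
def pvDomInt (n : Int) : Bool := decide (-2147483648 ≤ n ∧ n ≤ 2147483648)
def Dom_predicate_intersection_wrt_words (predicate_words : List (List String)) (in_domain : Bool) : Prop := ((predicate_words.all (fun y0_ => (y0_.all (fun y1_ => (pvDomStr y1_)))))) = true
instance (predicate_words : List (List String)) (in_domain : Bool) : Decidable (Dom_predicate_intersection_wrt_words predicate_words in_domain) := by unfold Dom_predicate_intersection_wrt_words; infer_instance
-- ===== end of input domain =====

-- B replaces A's all-pairs comparison by an inverted index (group by first token /
-- token -> indices), changing the asymptotic cost; return value proved equal on Pre_.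

-- ===== PORT A =====
-- inner loop of A: for k_, label_words_ in enumerate(predicate_words): …
-- (label_words is A's already-transformed value: the raw list if in_domain, set(label_words) otherwise)
def piwInnerA (predicate_words : List (List String)) (in_domain : Bool)
    (k : Int) (label_words : List String) : List Int :=
  (PySem.List.enumerate predicate_words).foldl (fun acc q =>
    if k ≠ q.1 then
      let label_words_ := if in_domain then q.2 else PySem.Set.ofList q.2
      if in_domain then
        if PySem.List.pyGet? label_words 0 == PySem.List.pyGet? label_words_ 0 then
          acc ++ [q.1] else acc
      else
        if PySem.Set.len (PySem.Set.inter label_words label_words_) ≠ 0 then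
          acc ++ [q.1] else acc
    else acc) []

def predicate_intersection_wrt_words (predicate_words : List (List String)) (in_domain : Bool) : List (Int × List Int) :=
  ((PySem.List.enumerate predicate_words).foldl (fun d p =>
      let label_words := if in_domain then p.2 else PySem.Set.ofList p.2
      d.insert p.1 (piwInnerA predicate_words in_domain p.1 label_words))
    (PySem.Dict.empty : PySem.Dict Int (List Int))).items

-- ===== PORT B =====
-- groups.setdefault(words[0], []).append(i)  (words[0] raises IndexError on an empty
-- list in Python; the `none` branch is unreachable inside Pre_)
def piwGroups (predicate_words : List (List String)) : PySem.Dict String (List Int) :=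
  (PySem.List.enumerate predicate_words).foldl (fun d p =>
    match PySem.List.pyGet? p.2 0 with
    | some t => d.modify t [] (· ++ [p.1])
    | none => d) PySem.Dict.empty

-- for t in set(words): index.setdefault(t, []).append(i)
def piwIndex (predicate_words : List (List String)) : PySem.Dict String (List Int) :=
  (PySem.List.enumerate predicate_words).foldl (fun d p =>
    (PySem.Set.ofList p.2).foldl (fun d t => d.modify t [] (· ++ [p.1])) d) PySem.Dict.empty

def predicate_intersection_wrt_words_alt (predicate_words : List (List String)) (in_domain : Bool) : List (Int × List Int) :=
  if in_domain then
    let groups := piwGroups predicate_words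
    ((PySem.List.enumerate predicate_words).foldl (fun r p =>
        r.insert p.1 (match PySem.List.pyGet? p.2 0 with
          | some t => (groups.getD t []).filter (fun j => decide (j ≠ p.1))
          | none => ([] : List Int)))
      (PySem.Dict.empty : PySem.Dict Int (List Int))).items
  else
    let n : Int := PySem.List.len predicate_words
    let index := piwIndex predicate_words
    ((PySem.List.enumerate predicate_words).foldl (fun r p =>
        let seen : PySem.Set Int :=
          (PySem.Set.ofList p.2).foldl (fun s t => PySem.Set.update s (index.getD t [])) PySem.Set.empty
        r.insert p.1 ((PySem.List.pyRange 0 n).filter (fun j => decide (j ≠ p.1) && seen.contains j)))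
      (PySem.Dict.empty : PySem.Dict Int (List Int))).items

-- ===== PRECONDITION & SPEC =====
-- Pre_ excludes in_domain=True inputs containing an empty token list: there A indexes
-- label_words[0] and raises IndexError whenever another predicate is present (and only by accident
-- returns on the degenerate singleton), while B's grouping pass raises on any of them.
def Pre_predicate_intersection_wrt_words (predicate_words : List (List String)) (in_domain : Bool) : Prop :=
  in_domain = true → ∀ l ∈ predicate_words, l ≠ []
instance (predicate_words : List (List String)) (in_domain : Bool) : Decidable (Pre_predicate_intersection_wrt_words predicate_words in_domain) := by unfold Pre_predicate_intersection_wrt_words; infer_instance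

def pvWitness_predicate_intersection_wrt_words : List (List String) × Bool :=
  ([["a"], ["a", "b"], ["b"]], true)

def Spec_predicate_intersection_wrt_words (predicate_words : List (List String)) (in_domain : Bool) (out : List (Int × List Int)) : Prop := out = predicate_intersection_wrt_words_alt predicate_words in_domain
instance (predicate_words : List (List String)) (in_domain : Bool) (out : List (Int × List Int)) : Decidable (Spec_predicate_intersection_wrt_words predicate_words in_domain out) := by unfold Spec_predicate_intersection_wrt_words; infer_instance

-- ===== CLAIM (what is proved, stated in full; the proofs are below) =====
def Claim_equal_predicate_intersection_wrt_words : Prop := ∀ (predicate_words : List (List String)) (in_domain : Bool), Dom_predicate_intersection_wrt_words predicate_words in_domain → Pre_predicate_intersection_wrt_words predicate_words in_domain → Spec_predicate_intersection_wrt_words predicate_words in_domain (predicate_intersection_wrt_words predicate_words in_domain)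

-- ===== LEMMAS AND PROOFS =====

theorem piw_items_foldl (pw : List (List String)) (f : Int × List String → List Int) :
    ((PySem.List.enumerate pw).foldl (fun d p => d.insert p.1 (f p)) (PySem.Dict.empty : PySem.Dict Int (List Int))).items
      = (PySem.List.enumerate pw).map (fun p => (p.1, f p)) := by
  have hnd : ((PySem.List.enumerate pw).map (fun p : Int × List String => p.1)).Nodup := by
    have h := PySem.List.pairwise_lt_enumerate (xs := pw) (s := 0)
    exact (List.pairwise_map.mpr (h.imp (fun hlt => ne_of_lt hlt)))
  simpa using PySem.Dict.items_foldl_insert_fresh (PySem.List.enumerate pw) (fun p => p.1) f PySem.Dict.empty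
    (fun p _ => PySem.Dict.contains_empty _) hnd

theorem piw_foldl_ite_ite {α β : Type} (P Q : α → Prop) [DecidablePred P] [DecidablePred Q] (f : α → β) :
    ∀ (l : List α) (acc : List β),
      l.foldl (fun acc x => if P x then (if Q x then acc ++ [f x] else acc) else acc) acc
        = acc ++ (l.filter (fun x => decide (P x) && decide (Q x))).map f := by
  intro l
  induction l with
  | nil => intro acc; simp
  | cons x l ih =>
    intro acc
    by_cases hP : P x <;> by_cases hQ : Q x <;>
      simp [List.foldl_cons, hP, hQ, ih]

theorem piwInnerA_true (pw : List (List String)) (k : Int) (lw : List String) :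
    piwInnerA pw true k lw
      = ((PySem.List.enumerate pw).filter
          (fun q => !decide (k = q.1) && decide (PySem.List.pyGet? lw 0 = PySem.List.pyGet? q.2 0))).map (fun q => q.1) := by
  have h := piw_foldl_ite_ite (fun q : Int × List String => k ≠ q.1)
      (fun q : Int × List String => (PySem.List.pyGet? lw 0 == PySem.List.pyGet? q.2 0) = true)
      (fun q => q.1) (PySem.List.enumerate pw) []
  simpa [piwInnerA] using h

theorem piwInnerA_false (pw : List (List String)) (k : Int) (lw : List String) :
    piwInnerA pw false k lw
      = ((PySem.List.enumerate pw).filter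
          (fun q => !decide (k = q.1) && !decide (PySem.Set.len (PySem.Set.inter lw (PySem.Set.ofList q.2)) = 0))).map (fun q => q.1) := by
  have h := piw_foldl_ite_ite (fun q : Int × List String => k ≠ q.1)
      (fun q : Int × List String => PySem.Set.len (PySem.Set.inter lw (PySem.Set.ofList q.2)) ≠ 0)
      (fun q => q.1) (PySem.List.enumerate pw) []
  simpa [piwInnerA] using h

theorem piw_pyGet?_zero {l : List String} (h : l ≠ []) :
    PySem.List.pyGet? l 0 = some (l.headD "") := by
  cases l with
  | nil => exact absurd rfl h
  | cons x xs => simp [PySem.List.pyGet?, PySem.List.pyIdx?]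

theorem piw_snd_mem {pw : List (List String)} {p : Int × List String}
    (hp : p ∈ PySem.List.enumerate pw) : p.2 ∈ pw := by
  rcases (PySem.List.mem_enumerate_iff pw 0 p).mp hp with ⟨k, hk, rfl⟩
  exact List.getElem_mem hk

theorem piwGroups_getD (pw : List (List String)) (h : ∀ l ∈ pw, l ≠ []) (t : String) :
    (piwGroups pw).getD t []
      = ((PySem.List.enumerate pw).filter (fun q => q.2.headD "" == t)).map (fun q => q.1) := by
  have hcongr : (piwGroups pw)
      = (PySem.List.enumerate pw).foldl
          (fun d p => d.modify (p.2.headD "") [] (· ++ [p.1])) PySem.Dict.empty := by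
    unfold piwGroups
    refine PySem.List.foldl_congr_mem _ _ _ _ ?_
    intro d p hp
    rw [piw_pyGet?_zero (h _ (piw_snd_mem hp))]
  have hmap : (PySem.List.enumerate pw).foldl
      (fun d p => d.modify (p.2.headD "") [] (· ++ [p.1])) PySem.Dict.empty
      = ((PySem.List.enumerate pw).map (fun p => (p.2.headD "", p.1))).foldl
          (fun d (p : String × Int) => d.modify p.1 [] (· ++ [p.2])) PySem.Dict.empty := by
    rw [List.foldl_map]
  rw [hcongr, hmap, PySem.Dict.getD_foldl_modify_append]
  simp [List.filter_map, Function.comp_def, PySem.Dict.getD_empty]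

theorem piw_mem_foldl_update {α β : Type} [BEq α] [LawfulBEq α] (f : β → List α) :
    ∀ (l : List β) (s : PySem.Set α) (x : α),
      x ∈ l.foldl (fun s t => PySem.Set.update s (f t)) s ↔ x ∈ s ∨ ∃ t ∈ l, x ∈ f t := by
  intro l
  induction l with
  | nil => intro s x; simp
  | cons t l ih =>
    intro s x
    rw [List.foldl_cons, ih, PySem.Set.mem_update]
    simp; tauto

theorem piwIndex_getD_mem (pw : List (List String)) (t : String) (j : Int) :
    j ∈ (piwIndex pw).getD t [] ↔ ∃ p ∈ PySem.List.enumerate pw, p.1 = j ∧ t ∈ p.2 := by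
  have hflat : piwIndex pw
      = ((PySem.List.enumerate pw).flatMap (fun p => (PySem.Set.ofList p.2).map (fun u => (u, p.1)))).foldl
          (fun d (pr : String × Int) => d.modify pr.1 [] (· ++ [pr.2])) PySem.Dict.empty := by
    unfold piwIndex
    rw [List.foldl_flatMap]
    refine PySem.List.foldl_congr_mem _ _ _ _ ?_
    intro d p _
    rw [List.foldl_map]
  rw [hflat, PySem.Dict.getD_foldl_modify_append]
  simp [List.mem_filter, List.mem_flatMap, PySem.Set.mem_ofList, PySem.Dict.getD_empty]

theorem piw_true_eq (pw : List (List String)) (h : ∀ l ∈ pw, l ≠ []) :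
    predicate_intersection_wrt_words pw true = predicate_intersection_wrt_words_alt pw true := by
  have hA : predicate_intersection_wrt_words pw true
      = (PySem.List.enumerate pw).map (fun p => (p.1, piwInnerA pw true p.1 p.2)) := by
    unfold predicate_intersection_wrt_words
    exact piw_items_foldl pw _
  have hB : predicate_intersection_wrt_words_alt pw true
      = (PySem.List.enumerate pw).map (fun p => (p.1,
          match PySem.List.pyGet? p.2 0 with
          | some t => ((piwGroups pw).getD t []).filter (fun j => decide (j ≠ p.1))
          | none => ([] : List Int))) := by
    unfold predicate_intersection_wrt_words_alt
    exact piw_items_foldl pw _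
  rw [hA, hB]
  refine List.map_congr_left ?_
  intro p hp
  have hne : p.2 ≠ [] := h _ (piw_snd_mem hp)
  rw [piw_pyGet?_zero hne]
  refine congrArg _ ?_
  rw [piwInnerA_true]
  show _ = ((piwGroups pw).getD (p.2.headD "") []).filter (fun j => decide (j ≠ p.1))
  rw [piwGroups_getD pw h, List.filter_map, List.filter_filter]
  refine congrArg _ (List.filter_congr ?_)
  intro q hq
  have hq2 : q.2 ≠ [] := h _ (piw_snd_mem hq)
  rw [piw_pyGet?_zero hne, piw_pyGet?_zero hq2]
  rw [show ∀ a b : String, (a == b) = decide (a = b) from fun a b => by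
        cases hd : decide (a = b) <;> simp_all]
  simp [Ne, eq_comm]

theorem piw_enum_fst (pw : List (List String)) (j : Int) (hj0 : 0 ≤ j) (hjn : j < (pw.length : Int)) (t : String) :
    (∃ q ∈ PySem.List.enumerate pw, q.1 = j ∧ t ∈ q.2) ↔ t ∈ PySem.List.pyGetD pw j [] := by
  constructor
  · rintro ⟨q, hq, hfst, ht⟩
    rcases (PySem.List.mem_enumerate_iff pw 0 q).mp hq with ⟨k, hk, rfl⟩
    simp only [zero_add] at hfst
    subst hfst
    rw [PySem.List.pyGetD_natCast, List.getD_eq_getElem _ _ hk]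
    exact ht
  · intro ht
    have hk : j.toNat < pw.length := by omega
    refine ⟨((j.toNat : Int), pw[j.toNat]), ?_, by omega, ?_⟩
    · exact (PySem.List.mem_enumerate_iff pw 0 _).mpr ⟨j.toNat, hk, by simp⟩
    · have : ((j.toNat : Int)) = j := by omega
      rw [← this, PySem.List.pyGetD_natCast, List.getD_eq_getElem _ _ hk] at ht
      exact ht

theorem piw_len_eq (s : PySem.Set String) : PySem.Set.len s = (s.length : Int) := rfl

theorem piw_contains_seen (pw : List (List String)) (p : Int × List String) (j : Int)
    (hj0 : 0 ≤ j) (hjn : j < (pw.length : Int)) :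
    ((PySem.Set.ofList p.2).foldl (fun s t => PySem.Set.update s ((piwIndex pw).getD t [])) PySem.Set.empty).contains j
      = !decide (PySem.Set.len (PySem.Set.inter (PySem.Set.ofList p.2) (PySem.Set.ofList (PySem.List.pyGetD pw j []))) = 0) := by
  rw [PySem.Set.contains_eq_decide, ← decide_not, decide_eq_decide]
  rw [piw_mem_foldl_update, piw_len_eq]
  constructor
  · rintro (hmem | ⟨t, ht, hidx⟩)
    · simp [PySem.Set.empty] at hmem
    · rw [PySem.Set.mem_ofList] at ht
      have hin : t ∈ PySem.Set.inter (PySem.Set.ofList p.2) (PySem.Set.ofList (PySem.List.pyGetD pw j [])) := by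
        rw [PySem.Set.mem_inter, PySem.Set.mem_ofList, PySem.Set.mem_ofList]
        exact ⟨ht, (piw_enum_fst pw j hj0 hjn t).mp ((piwIndex_getD_mem pw t j).mp hidx)⟩
      intro hlen
      have h0 : PySem.Set.inter (PySem.Set.ofList p.2) (PySem.Set.ofList (PySem.List.pyGetD pw j [])) = [] :=
        List.length_eq_zero_iff.mp (by exact_mod_cast hlen)
      rw [h0] at hin
      exact absurd hin (List.not_mem_nil)
  · intro hlen
    have hne : PySem.Set.inter (PySem.Set.ofList p.2) (PySem.Set.ofList (PySem.List.pyGetD pw j [])) ≠ [] := by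
      intro hnil; exact hlen (by rw [hnil]; simp)
    rcases List.exists_mem_of_ne_nil _ hne with ⟨t, ht⟩
    have ht' := (PySem.Set.mem_inter _ _ _).mp ht
    rw [PySem.Set.mem_ofList, PySem.Set.mem_ofList] at ht'
    exact Or.inr ⟨t, (PySem.Set.mem_ofList _ _).mpr ht'.1,
      (piwIndex_getD_mem pw t j).mpr ((piw_enum_fst pw j hj0 hjn t).mpr ht'.2)⟩

theorem piw_false_eq (pw : List (List String)) :
    predicate_intersection_wrt_words pw false = predicate_intersection_wrt_words_alt pw false := by
  have hA : predicate_intersection_wrt_words pw false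
      = (PySem.List.enumerate pw).map (fun p => (p.1, piwInnerA pw false p.1 (PySem.Set.ofList p.2))) := by
    unfold predicate_intersection_wrt_words
    exact piw_items_foldl pw _
  have hB : predicate_intersection_wrt_words_alt pw false
      = (PySem.List.enumerate pw).map (fun p => (p.1,
          (PySem.List.pyRange 0 (PySem.List.len pw)).filter (fun j => decide (j ≠ p.1) &&
            ((PySem.Set.ofList p.2).foldl (fun s t => PySem.Set.update s ((piwIndex pw).getD t [])) PySem.Set.empty).contains j))) := by
    unfold predicate_intersection_wrt_words_alt
    exact piw_items_foldl pw _
  rw [hA, hB]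
  refine List.map_congr_left ?_
  intro p _
  refine congrArg _ ?_
  rw [piwInnerA_false]
  conv_lhs => rw [PySem.List.enumerate_eq_map_pyRange pw [], List.filter_map, List.map_map]
  rw [show ((fun q : Int × List String => q.1) ∘ fun j => (j, PySem.List.pyGetD pw j [])) = id from rfl, List.map_id]
  refine List.filter_congr ?_
  intro j hj
  rcases PySem.List.mem_pyRange_one.mp hj with ⟨hj0, hjn⟩
  rw [Function.comp_apply] at *
  rw [piw_contains_seen pw p j hj0 (by exact_mod_cast hjn)]
  simp [Ne, eq_comm]

-- ===== VERDICT (by name: the statement is the Claim_ definition above) =====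
theorem predicate_intersection_wrt_words_spec : Claim_equal_predicate_intersection_wrt_words := by
  intro pw ind _ hpre
  unfold Spec_predicate_intersection_wrt_words
  cases ind
  · exact piw_false_eq pw
  · exact piw_true_eq pw (hpre rfl)
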